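-- pv_equiv track=rewrite | github.com/somenzz/geekbang | mathOfProgramer/chapter09_Levenshtein_distance.py | get_right_word_from_common_substring
-- ===== SOURCE A (Python) =====
-- def common_substring_dp(s: str, t: str) -> int:
--     m, n = len(s), len(t)
--     table = [[0] * (n + 1) for _ in range(m + 1)]
--     for i in range(1, m + 1):
--         for j in range(1, n + 1):
--             table[i][j] = max(
--                 table[i - 1][j],
--                 table[i][j - 1],
--                 int(s[i - 1] == t[j - 1]) + table[i - 1][j - 1],
--             )
--     return table[-1][-1]
--
-- def get_right_word_from_common_substring(all_words, input_word):
--     """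
--     输入一个单词，返回最长公共子串长度最大的单词
--     :param input_word:
--     :return:
--     """
--     words = all_words  # 获取所有正确的单词
--     right_word = input_word
--     len_origin = len(input_word)
--     max_len = 0
--     for item in words:
--         length = common_substring_dp(input_word, item)
--         if length >= len_origin:
--             return item
--         if max_len < length:
--             max_len = length
--             right_word = item
--     return right_word
-- ===== SOURCE B (Python) =====
-- def common_lcs(s, t):
--     # top-down memoized recursion over prefix lengths, with the standard
--     # match shortcut: on a match take 1 + lcs(i-1, j-1) directly (an optimal
--     # LCS of matching prefixes can always use the final match), otherwise
--     # max of dropping the last char of either side.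
--     memo = {}
--     def lcs(i, j):
--         if i == 0 or j == 0:
--             return 0
--         key = (i, j)
--         if key in memo:
--             return memo[key]
--         if s[i - 1] == t[j - 1]:
--             v = 1 + lcs(i - 1, j - 1)
--         else:
--             v = max(lcs(i - 1, j), lcs(i, j - 1))
--         memo[key] = v
--         return v
--     return lcs(len(s), len(t))
--
-- def get_right_word_from_common_substring(all_words, input_word):
--     best_len = 0
--     best_word = input_word
--     n = len(input_word)
--     for item in all_words:
--         l = common_lcs(input_word, item)
--         if l >= n:
--             return item
--         if l > best_len:
--             best_len = l
--             best_word = item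
--     return best_word
-- ===== Notes on version B (the rewrite author's own statement) =====
-- stated objective: alternative
-- what changed: The LCS length is computed by a top-down memoized recursion on prefix lengths (dict cache, two-branch recurrence with the match shortcut 1+lcs(i-1,j-1)) instead of A's bottom-up (m+1)x(n+1) table filled by nested index loops with a three-way max; only needed cells are ever computed.
import Mathlib
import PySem

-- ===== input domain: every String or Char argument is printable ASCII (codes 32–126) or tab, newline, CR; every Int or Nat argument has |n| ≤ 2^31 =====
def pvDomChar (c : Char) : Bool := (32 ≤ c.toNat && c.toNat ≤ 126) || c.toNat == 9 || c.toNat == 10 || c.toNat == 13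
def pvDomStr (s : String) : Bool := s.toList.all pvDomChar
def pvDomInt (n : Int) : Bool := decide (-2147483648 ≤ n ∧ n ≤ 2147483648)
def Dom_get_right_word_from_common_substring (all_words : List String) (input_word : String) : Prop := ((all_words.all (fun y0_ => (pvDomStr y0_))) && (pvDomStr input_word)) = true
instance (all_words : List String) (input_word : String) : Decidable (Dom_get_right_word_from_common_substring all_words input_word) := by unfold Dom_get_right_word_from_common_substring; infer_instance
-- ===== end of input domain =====

-- B recomputes each LCS length by a top-down memoized recursion on prefix lengths
-- (dict cache, two-branch recurrence with the match shortcut 1 + lcs(i-1, j-1))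
-- instead of A's bottom-up (m+1)x(n+1) table filled by nested index loops;
-- same results, alternative structure (no speed claim).

-- ===== PORT A =====
-- common_substring_dp, bottom-up 2D table.
-- Python's i,j run over range(1, m+1) / range(1, n+1); here i0 = i-1, j0 = j-1 run over
-- List.range m / List.range n. s[i-1] / t[j-1] are always in range (1 ≤ i ≤ m), so
-- List.getD is exact; Python's max(a,b,c) on ints equals max (max a b) c.
def pvInnerStepA (sl tl : List Char) (i0 : Nat) (tab : List (List Int)) (j0 : Nat) : List (List Int) :=
  tab.set (i0+1) ((tab.getD (i0+1) []).set (j0+1)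
    (max (max ((tab.getD i0 []).getD (j0+1) 0) ((tab.getD (i0+1) []).getD j0 0))
      ((if sl.getD i0 ' ' == tl.getD j0 ' ' then (1:Int) else 0) + (tab.getD i0 []).getD j0 0)))

def pvOuterStepA (sl tl : List Char) (tab : List (List Int)) (i0 : Nat) : List (List Int) :=
  (List.range tl.length).foldl (pvInnerStepA sl tl i0) tab

-- table[-1][-1]: the table always has m+1 rows of n+1 entries, so -1 is index m resp. n
def pvCsdpA (s t : String) : Int :=
  (((List.range s.toList.length).foldl (pvOuterStepA s.toList t.toList)
      (List.replicate (s.toList.length+1) (List.replicate (t.toList.length+1) (0:Int)))).getD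
    s.toList.length []).getD t.toList.length 0

-- the loop of get_right_word_from_common_substring, with its early return
def pvLoopA (input_word : String) (len_origin : Int) :
    List String → String → Int → String
  | [], right_word, _ => right_word
  | item :: rest, right_word, max_len =>
    let length := pvCsdpA input_word item
    if len_origin ≤ length then item
    else if max_len < length then pvLoopA input_word len_origin rest item length
    else pvLoopA input_word len_origin rest right_word max_len

def get_right_word_from_common_substring (all_words : List String) (input_word : String) : String :=
  pvLoopA input_word (PySem.Str.len input_word) all_words input_word 0

-- ===== PORT B =====
-- common_lcs: lcs(i, j), top-down recursion memoized in a dict keyed on (i, j);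
-- base case before the memo lookup, match shortcut, two-branch max otherwise,
-- exactly as in Source B. The memo dict is threaded through as state.
def pvLcsGo (sl tl : List Char) : Nat → Nat → PySem.Dict (Nat × Nat) Int → Int × PySem.Dict (Nat × Nat) Int
  | 0, _, memo => (0, memo)
  | _+1, 0, memo => (0, memo)
  | i+1, j+1, memo =>
    match memo.get? (i+1, j+1) with
    | some v => (v, memo)
    | none =>
      if sl.getD i ' ' == tl.getD j ' ' then
        let r := pvLcsGo sl tl i j memo
        (1 + r.1, r.2.insert (i+1, j+1) (1 + r.1))
      else
        let a := pvLcsGo sl tl i (j+1) memo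
        let b := pvLcsGo sl tl (i+1) j a.2
        (max a.1 b.1, b.2.insert (i+1, j+1) (max a.1 b.1))
  termination_by i j _ => (i, j)

def pvCsdpB (s t : String) : Int :=
  (pvLcsGo s.toList t.toList s.toList.length t.toList.length PySem.Dict.empty).1

def pvLoopB (input_word : String) (n : Int) :
    List String → Int → String → String
  | [], _, best_word => best_word
  | item :: rest, best_len, best_word =>
    let l := pvCsdpB input_word item
    if n ≤ l then item
    else if best_len < l then pvLoopB input_word n rest l item
    else pvLoopB input_word n rest best_len best_word

def get_right_word_from_common_substring_alt (all_words : List String) (input_word : String) : String :=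
  pvLoopB input_word (PySem.Str.len input_word) all_words 0 input_word

-- ===== PRECONDITION & SPEC =====
def Spec_get_right_word_from_common_substring (all_words : List String) (input_word : String) (out : String) : Prop := out = get_right_word_from_common_substring_alt all_words input_word
instance (all_words : List String) (input_word : String) (out : String) : Decidable (Spec_get_right_word_from_common_substring all_words input_word out) := by unfold Spec_get_right_word_from_common_substring; infer_instance

-- ===== CLAIM (what is proved, stated in full; the proofs are below) =====
def Claim_equal_get_right_word_from_common_substring : Prop := ∀ (all_words : List String) (input_word : String), Dom_get_right_word_from_common_substring all_words input_word → Spec_get_right_word_from_common_substring all_words input_word (get_right_word_from_common_substring all_words input_word)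

-- ===== LEMMAS AND PROOFS =====

-- the LCS-length recurrence A fills in bottom-up
def pvL (sl tl : List Char) : Nat → Nat → Int
  | 0, _ => 0
  | _+1, 0 => 0
  | i+1, j+1 => max (max (pvL sl tl i (j+1)) (pvL sl tl (i+1) j))
      ((if sl.getD i ' ' == tl.getD j ' ' then (1:Int) else 0) + pvL sl tl i j)
  termination_by i j => (i, j)

lemma pvL_zero_left (sl tl : List Char) (j : Nat) : pvL sl tl 0 j = 0 := by
  cases j <;> simp [pvL]

lemma pvL_zero_right (sl tl : List Char) (i : Nat) : pvL sl tl i 0 = 0 := by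
  cases i <;> simp [pvL]

lemma pvL_succ (sl tl : List Char) (i j : Nat) :
    pvL sl tl (i+1) (j+1) = max (max (pvL sl tl i (j+1)) (pvL sl tl (i+1) j))
      ((if sl.getD i ' ' == tl.getD j ' ' then (1:Int) else 0) + pvL sl tl i j) := by
  simp [pvL]

-- row i of the filled DP table
def pvRow (sl tl : List Char) (i : Nat) : List Int :=
  (List.range (tl.length+1)).map (pvL sl tl i)

lemma pv_getD_map_range (g : Nat → Int) {k j : Nat} (h : j < k) :
    ((List.range k).map g).getD j 0 = g j := by
  simp [List.getD_eq_getElem?_getD, h]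

lemma pvRow_getD (sl tl : List Char) (i j : Nat) (h : j ≤ tl.length) :
    (pvRow sl tl i).getD j 0 = pvL sl tl i j := by
  exact pv_getD_map_range _ (by omega)

lemma pvRow_zero (sl tl : List Char) :
    pvRow sl tl 0 = List.replicate (tl.length+1) (0:Int) := by
  unfold pvRow
  rw [show (List.range (tl.length+1)).map (pvL sl tl 0)
        = (List.range (tl.length+1)).map (fun _ => (0:Int)) from
      List.map_congr_left (fun a _ => pvL_zero_left sl tl a)]
  simp [List.map_const']

-- ---------- properties of pvL used to justify B's two-branch recurrence ----------

lemma pvL_mono_left (sl tl : List Char) (i j : Nat) :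
    pvL sl tl i j ≤ pvL sl tl (i+1) j := by
  cases j with
  | zero => simp [pvL_zero_right]
  | succ j => rw [pvL_succ]; exact le_max_of_le_left (le_max_left _ _)

lemma pvL_mono_right (sl tl : List Char) (i j : Nat) :
    pvL sl tl i j ≤ pvL sl tl i (j+1) := by
  cases i with
  | zero => simp [pvL_zero_left]
  | succ i => rw [pvL_succ]; exact le_max_of_le_left (le_max_right _ _)

lemma pvL_lip_left (sl tl : List Char) (i : Nat) : ∀ j : Nat,
    pvL sl tl (i+1) j ≤ pvL sl tl i j + 1 := by
  intro j
  induction j with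
  | zero => simp [pvL_zero_right]
  | succ j ih =>
    rw [pvL_succ]
    have h1 := pvL_mono_right sl tl i j
    have hc : (if sl.getD i ' ' == tl.getD j ' ' then (1:Int) else 0) ≤ 1 := by
      split <;> omega
    simp only [max_le_iff]
    omega

lemma pvL_lip_right (sl tl : List Char) (j : Nat) : ∀ i : Nat,
    pvL sl tl i (j+1) ≤ pvL sl tl i j + 1 := by
  intro i
  induction i with
  | zero => simp [pvL_zero_left]
  | succ i ih =>
    rw [pvL_succ]
    have h1 := pvL_mono_left sl tl i j
    have hc : (if sl.getD i ' ' == tl.getD j ' ' then (1:Int) else 0) ≤ 1 := by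
      split <;> omega
    simp only [max_le_iff]
    omega

-- B's recurrence computes the same values as A's three-way max
lemma pvL_succ_alt (sl tl : List Char) (i j : Nat) :
    pvL sl tl (i+1) (j+1) = if sl.getD i ' ' == tl.getD j ' '
      then 1 + pvL sl tl i j
      else max (pvL sl tl i (j+1)) (pvL sl tl (i+1) j) := by
  rw [pvL_succ]
  split_ifs with h
  · have ha := pvL_lip_right sl tl j i
    have hb := pvL_lip_left sl tl i j
    exact max_eq_right (max_le (by omega) (by omega))
  · have hm := pvL_mono_right sl tl i j
    exact max_eq_left (le_trans (by omega) (le_max_left _ _))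

-- ---------- B side: the memo invariant ----------

def pvMemoOK (sl tl : List Char) (d : PySem.Dict (Nat × Nat) Int) : Prop :=
  ∀ i j v, d.get? (i, j) = some v → v = pvL sl tl i j

lemma pvMemoOK_insert (sl tl : List Char) (d : PySem.Dict (Nat × Nat) Int)
    (i j : Nat) (v : Int) (hd : pvMemoOK sl tl d) (hv : v = pvL sl tl i j) :
    pvMemoOK sl tl (d.insert (i, j) v) := by
  intro i' j' v' h
  rw [PySem.Dict.get?_insert] at h
  split_ifs at h with he
  · cases h
    obtain ⟨h1, h2⟩ := Prod.mk.injEq .. ▸ he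
    subst h1; subst h2; exact hv
  · exact hd i' j' v' h

lemma pvGo_spec (sl tl : List Char) : ∀ (n i j : Nat) (memo : PySem.Dict (Nat × Nat) Int),
    i + j ≤ n → pvMemoOK sl tl memo →
    (pvLcsGo sl tl i j memo).1 = pvL sl tl i j ∧ pvMemoOK sl tl (pvLcsGo sl tl i j memo).2 := by
  intro n
  induction n with
  | zero =>
    intro i j memo hle hm
    have hi : i = 0 := by omega
    subst hi
    simp [pvLcsGo, pvL_zero_left]
    exact hm
  | succ n ih =>
    intro i j memo hle hm
    match i, j with
    | 0, j =>
      simp [pvLcsGo, pvL_zero_left]; exact hm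
    | i+1, 0 =>
      simp [pvLcsGo, pvL_zero_right]; exact hm
    | i+1, j+1 =>
      cases hg : memo.get? (i+1, j+1) with
      | some v =>
        have : pvLcsGo sl tl (i+1) (j+1) memo = (v, memo) := by
          rw [pvLcsGo]; rw [hg]
        rw [this]
        exact ⟨hm _ _ _ hg, hm⟩
      | none =>
        by_cases hc : (sl.getD i ' ' == tl.getD j ' ') = true
        · have hr := ih i j memo (by omega) hm
          have : pvLcsGo sl tl (i+1) (j+1) memo =
              (1 + (pvLcsGo sl tl i j memo).1,
               (pvLcsGo sl tl i j memo).2.insert (i+1, j+1) (1 + (pvLcsGo sl tl i j memo).1)) := by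
            rw [pvLcsGo]; rw [hg, if_pos hc]
          rw [this]
          refine ⟨?_, ?_⟩
          · rw [hr.1, pvL_succ_alt, if_pos hc]
          · exact pvMemoOK_insert sl tl _ _ _ _ hr.2 (by rw [hr.1, pvL_succ_alt, if_pos hc])
        · have ha := ih i (j+1) memo (by omega) hm
          have hb := ih (i+1) j (pvLcsGo sl tl i (j+1) memo).2 (by omega) ha.2
          have : pvLcsGo sl tl (i+1) (j+1) memo =
              (max (pvLcsGo sl tl i (j+1) memo).1
                   (pvLcsGo sl tl (i+1) j (pvLcsGo sl tl i (j+1) memo).2).1,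
               (pvLcsGo sl tl (i+1) j (pvLcsGo sl tl i (j+1) memo).2).2.insert (i+1, j+1)
                 (max (pvLcsGo sl tl i (j+1) memo).1
                      (pvLcsGo sl tl (i+1) j (pvLcsGo sl tl i (j+1) memo).2).1)) := by
            rw [pvLcsGo]; rw [hg, if_neg hc]
          rw [this]
          have hval : max (pvLcsGo sl tl i (j+1) memo).1
              (pvLcsGo sl tl (i+1) j (pvLcsGo sl tl i (j+1) memo).2).1
              = pvL sl tl (i+1) (j+1) := by
            rw [ha.1, hb.1, pvL_succ_alt, if_neg (by simpa using hc)]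
          exact ⟨hval, pvMemoOK_insert sl tl _ _ _ _ hb.2 hval⟩

lemma pvCsdpB_eq (s t : String) :
    pvCsdpB s t = pvL s.toList t.toList s.toList.length t.toList.length := by
  unfold pvCsdpB
  exact (pvGo_spec s.toList t.toList (s.toList.length + t.toList.length) _ _ _ le_rfl
    (by intro i j v h; simp [PySem.Dict.get?_empty] at h)).1

-- ---------- A side ----------

-- the table after the first i0 outer iterations, with the next row filled up to column k
def pvTabMid (sl tl : List Char) (i0 k : Nat) : List (List Int) :=
  (List.range (sl.length+1)).map (fun r =>
    if r ≤ i0 then pvRow sl tl r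
    else if r = i0+1 then (List.range (k+1)).map (pvL sl tl (i0+1)) ++ List.replicate (tl.length - k) 0
    else List.replicate (tl.length+1) 0)

def pvTab (sl tl : List Char) (i : Nat) : List (List Int) :=
  (List.range (sl.length+1)).map (fun r =>
    if r ≤ i then pvRow sl tl r else List.replicate (tl.length+1) 0)

lemma pv_getD_map_range_list (g : Nat → List Int) {k j : Nat} (h : j < k) :
    ((List.range k).map g).getD j [] = g j := by
  simp [List.getD_eq_getElem?_getD, h]

lemma pv_map_range_set (g : Nat → List Int) (q i : Nat) (x : List Int) (_h : i < q) :
    ((List.range q).map g).set i x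
      = (List.range q).map (fun r => if r = i then x else g r) := by
  apply List.ext_getElem
  · simp
  · intro p h1 h2
    simp only [List.getElem_set, List.getElem_map, List.getElem_range]
    by_cases hp : i = p
    · simp [hp]
    · rw [if_neg hp, if_neg (fun hc => hp hc.symm)]

lemma pv_set_append_cons (xs ys : List Int) (y v : Int) (n : Nat) (hn : n = xs.length) :
    (xs ++ y :: ys).set n v = xs ++ v :: ys := by
  subst hn
  induction xs with
  | nil => rfl
  | cons a xs ih => simp [ih]

lemma pvTabMid_zero (sl tl : List Char) (i0 : Nat) :
    pvTabMid sl tl i0 0 = pvTab sl tl i0 := by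
  unfold pvTabMid pvTab
  apply List.map_congr_left
  intro r _
  split_ifs with h1 h2 <;> try rfl
  · subst h2
    have : (List.range 1).map (pvL sl tl (i0+1)) = [0] := by
      simp [pvL_zero_right]
    rw [this]
    cases htl : tl.length with
    | zero => simp
    | succ n => simp [List.replicate_succ]

lemma pvInnerA_step (sl tl : List Char) (i0 : Nat) (hi : i0 < sl.length)
    (k : Nat) (hk : k < tl.length) :
    pvInnerStepA sl tl i0 (pvTabMid sl tl i0 k) k = pvTabMid sl tl i0 (k+1) := by
  have hm : i0 + 1 < sl.length + 1 := by omega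
  have hrow1 : (pvTabMid sl tl i0 k).getD i0 [] = pvRow sl tl i0 := by
    unfold pvTabMid
    rw [pv_getD_map_range_list _ (by omega)]
    simp
  have hrow2 : (pvTabMid sl tl i0 k).getD (i0+1) []
      = (List.range (k+1)).map (pvL sl tl (i0+1)) ++ List.replicate (tl.length - k) 0 := by
    unfold pvTabMid
    rw [pv_getD_map_range_list _ (by omega)]
    simp
  unfold pvInnerStepA
  rw [hrow1, hrow2]
  rw [pvRow_getD sl tl i0 (k+1) (by omega), pvRow_getD sl tl i0 k (by omega)]
  have hcur : ((List.range (k+1)).map (pvL sl tl (i0+1)) ++ List.replicate (tl.length - k) 0).getD k 0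
      = pvL sl tl (i0+1) k := by
    rw [List.getD_append _ _ _ _ (by simp)]
    exact pv_getD_map_range _ (by omega)
  rw [hcur]
  have hrep : List.replicate (tl.length - k) (0:Int) = 0 :: List.replicate (tl.length - (k+1)) 0 := by
    rw [show tl.length - k = (tl.length - (k+1)) + 1 by omega, List.replicate_succ]
  have hsetrow : ((List.range (k+1)).map (pvL sl tl (i0+1)) ++ List.replicate (tl.length - k) 0).set (k+1)
        (max (max (pvL sl tl i0 (k+1)) (pvL sl tl (i0+1) k))
          ((if sl.getD i0 ' ' == tl.getD k ' ' then (1:Int) else 0) + pvL sl tl i0 k))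
      = (List.range (k+2)).map (pvL sl tl (i0+1)) ++ List.replicate (tl.length - (k+1)) 0 := by
    rw [hrep]
    rw [pv_set_append_cons _ _ _ _ _ (by simp)]
    rw [List.range_succ (n := k+1), List.map_append]
    simp [pvL_succ]
  rw [hsetrow]
  unfold pvTabMid
  rw [pv_map_range_set _ _ _ _ hm]
  apply List.map_congr_left
  intro r _
  split_ifs with h1 h2 h3 <;> first | rfl | omega

lemma pvInnerA (sl tl : List Char) (i0 : Nat) (hi : i0 < sl.length)
    (k : Nat) (hk : k ≤ tl.length) :
    (List.range k).foldl (pvInnerStepA sl tl i0) (pvTab sl tl i0) = pvTabMid sl tl i0 k := by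
  induction k with
  | zero => simp [pvTabMid_zero]
  | succ k ih =>
    rw [List.range_succ, List.foldl_append, ih (by omega)]
    simp only [List.foldl_cons, List.foldl_nil]
    exact pvInnerA_step sl tl i0 hi k (by omega)

lemma pvTabMid_full (sl tl : List Char) (i0 : Nat) :
    pvTabMid sl tl i0 tl.length = pvTab sl tl (i0+1) := by
  unfold pvTabMid pvTab
  apply List.map_congr_left
  intro r _
  split_ifs with h1 h2 h3 h4 <;> try first | rfl | omega
  · subst h3
    simp [pvRow]

lemma pvTab_zero (sl tl : List Char) :
    pvTab sl tl 0 = List.replicate (sl.length+1) (List.replicate (tl.length+1) (0:Int)) := by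
  unfold pvTab
  rw [show (List.range (sl.length+1)).map
        (fun r => if r ≤ 0 then pvRow sl tl r else List.replicate (tl.length+1) 0)
        = (List.range (sl.length+1)).map (fun _ => List.replicate (tl.length+1) (0:Int)) from
      List.map_congr_left (by
        intro r _
        split_ifs with h
        · rw [show r = 0 by omega, pvRow_zero]
        · rfl)]
  simp [List.map_const']

lemma pvOuterA (sl tl : List Char) (k : Nat) (hk : k ≤ sl.length) :
    (List.range k).foldl (pvOuterStepA sl tl)
        (List.replicate (sl.length+1) (List.replicate (tl.length+1) (0:Int)))
      = pvTab sl tl k := by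
  induction k with
  | zero => simp [pvTab_zero]
  | succ k ih =>
    rw [List.range_succ, List.foldl_append, ih (by omega)]
    simp only [List.foldl_cons, List.foldl_nil, pvOuterStepA]
    rw [pvInnerA sl tl k (by omega) tl.length le_rfl]
    exact pvTabMid_full sl tl k

lemma pvCsdpA_eq (s t : String) :
    pvCsdpA s t = pvL s.toList t.toList s.toList.length t.toList.length := by
  unfold pvCsdpA
  rw [pvOuterA s.toList t.toList s.toList.length le_rfl]
  unfold pvTab
  rw [pv_getD_map_range_list _ (by omega)]
  simp only [le_refl, if_true]
  exact pvRow_getD _ _ _ _ le_rfl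

lemma pvCsdp_eq (s t : String) : pvCsdpA s t = pvCsdpB s t := by
  rw [pvCsdpA_eq, pvCsdpB_eq]

lemma pvLoop_eq (input_word : String) (n : Int) (ws : List String)
    (rw : String) (ml : Int) :
    pvLoopA input_word n ws rw ml = pvLoopB input_word n ws ml rw := by
  induction ws generalizing rw ml with
  | nil => rfl
  | cons item rest ih =>
    simp only [pvLoopA, pvLoopB, pvCsdp_eq]
    split_ifs <;> simp [ih]

-- ===== VERDICT (by name: the statement is the Claim_ definition above) =====
theorem get_right_word_from_common_substring_spec : Claim_equal_get_right_word_from_common_substring := by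
  intro all_words input_word _
  unfold Spec_get_right_word_from_common_substring
  unfold get_right_word_from_common_substring get_right_word_from_common_substring_alt
  exact pvLoop_eq input_word (PySem.Str.len input_word) all_words input_word 0
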